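-- pv_equiv track=rewrite | github.com/normanyahq/LeetCodeSolution | Verify Preorder Serialization of a Binary Tree/solution.py | isValidSerialization
-- ===== SOURCE A (Python) =====
-- def isValidSerialization(preorder):
--     """
--     :type preorder: str
--     :rtype: bool
--     """
--     preorder = preorder.split(',')
--     stack = [preorder[0]]
--     i = 1
--     while i < len(preorder) and stack and stack[0] != "#":
--         c = preorder[i]
--         if c == "#":
--             stack.append("#")
--             while stack[0] != '#' and stack[-1] == stack[-2] and stack[-1] == "#":
--                 try:
--                     stack.pop()
--                     stack.pop()
--                     stack.pop()
--                 except: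
--                     return False
--                 stack.append("#")
--
--         else:
--             stack.append(c)
--         i += 1
--     return i == len(preorder) and stack[0] == "#"
-- ===== SOURCE B (Python) =====
-- def isValidSerialization(preorder):
--     """
--     :type preorder: str
--     :rtype: bool
--     """
--     slots = 1
--     for token in preorder.split(','):
--         slots -= 1
--         if slots < 0:
--             return False
--         if token != "#":
--             slots += 2
--     return slots == 0
-- ===== Notes on version B (the rewrite author's own statement) =====
-- stated objective: simpler
-- what changed: Replaces the explicit stack with #,#->#-collapsing inner loop by a single linear pass over the tokens maintaining an available-slot counter (slots = 1; each token consumes a slot, each non-# token opens two).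
import Mathlib
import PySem

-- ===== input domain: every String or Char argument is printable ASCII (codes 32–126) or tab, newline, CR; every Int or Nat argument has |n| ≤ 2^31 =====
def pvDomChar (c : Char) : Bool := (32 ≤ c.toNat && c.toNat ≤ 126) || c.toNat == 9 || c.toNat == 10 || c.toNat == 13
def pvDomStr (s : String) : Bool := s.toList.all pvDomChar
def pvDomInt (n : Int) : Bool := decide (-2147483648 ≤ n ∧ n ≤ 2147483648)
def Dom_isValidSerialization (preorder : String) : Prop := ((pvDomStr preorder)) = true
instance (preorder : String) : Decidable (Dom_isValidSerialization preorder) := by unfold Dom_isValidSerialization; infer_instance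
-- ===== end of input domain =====

-- B replaces A's explicit stack (with its #,#→# collapsing inner loop) by a single
-- available-slot counter pass over the tokens; same return value, no side effects.

-- ===== PORT A =====
-- inner `while` loop of A: collapses the stack top; `none` models the `return False`
-- of the `except` branch (pop on an empty list).
def pvInnerA (stack : List String) : Option (List String) :=
  if (PySem.List.pyGet? stack 0 != some "#")
      && (PySem.List.pyGet? stack (-1) == PySem.List.pyGet? stack (-2))
      && (PySem.List.pyGet? stack (-1) == some "#") then
    match _h1 : PySem.List.pop? stack with
    | none => none
    | some (_, s1) =>
      match _h2 : PySem.List.pop? s1 with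
      | none => none
      | some (_, s2) =>
        match _h3 : PySem.List.pop? s2 with
        | none => none
        | some (_, s3) => pvInnerA (s3 ++ ["#"])
  else
    some stack
termination_by stack.length
decreasing_by
  have e1 := PySem.List.length_of_pop?_eq_some _ _h1
  have e2 := PySem.List.length_of_pop?_eq_some _ _h2
  have e3 := PySem.List.length_of_pop?_eq_some _ _h3
  simp only [List.length_append, List.length_cons, List.length_nil]
  dsimp only at e1 e2 e3
  omega

-- outer `while` loop of A over the remaining tokens (`i` advances ↔ head of `rem` is
-- consumed); returns `none` for A's `return False`, otherwise the tokens left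
-- unconsumed at loop exit together with the final stack.
def pvOuterA (rem : List String) (stack : List String) : Option (List String × List String) :=
  match rem with
  | [] => some ([], stack)
  | c :: rest =>
    if (!stack.isEmpty) && (PySem.List.pyGet? stack 0 != some "#") then
      if c == "#" then
        match pvInnerA (stack ++ ["#"]) with
        | none => none
        | some stack' => pvOuterA rest stack'
      else
        pvOuterA rest (stack ++ [c])
    else
      some (c :: rest, stack)

def isValidSerialization (preorder : String) : Bool :=
  match (PySem.Str.split? preorder ",").getD [""] with
  | [] => false   -- unreachable: str.split always returns a non-empty list
  | t0 :: rest =>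
    match pvOuterA rest [t0] with
    | none => false   -- A's `return False` inside the inner loop
    | some (remLeft, stack) =>
      remLeft.isEmpty && (PySem.List.pyGet? stack 0 == some "#")

-- ===== PORT B =====
def pvLoopB : List String → Int → Bool
  | [], slots => slots == 0
  | token :: rest, slots =>
    let s := slots - 1
    if s < 0 then false
    else pvLoopB rest (if token != "#" then s + 2 else s)

def isValidSerialization_alt (preorder : String) : Bool :=
  pvLoopB ((PySem.Str.split? preorder ",").getD [""]) 1

-- ===== PRECONDITION & SPEC =====
def Spec_isValidSerialization (preorder : String) (out : Bool) : Prop := out = isValidSerialization_alt preorder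
instance (preorder : String) (out : Bool) : Decidable (Spec_isValidSerialization preorder out) := by unfold Spec_isValidSerialization; infer_instance

-- ===== CLAIM (what is proved, stated in full; the proofs are below) =====
def Claim_equal_isValidSerialization : Prop := ∀ (preorder : String), Dom_isValidSerialization preorder → Spec_isValidSerialization preorder (isValidSerialization preorder)

-- ===== LEMMAS AND PROOFS =====

-- the relation 'not both tokens are "#"': invariant of A's stack between iterations
def pvNoHH (a b : String) : Prop := ¬(a = "#" ∧ b = "#")

-- the slot counter B maintains, read off A's stack
def pvSlots (s : List String) : Int := (s.length : Int) - 2 * (s.count "#") + 1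

lemma pvCnt (s : List String) (h : List.IsChain pvNoHH s) :
    2 * s.count "#" ≤ s.length + 1 ∧ (s.headD "" ≠ "#" → 2 * s.count "#" ≤ s.length) := by
  induction s with
  | nil => simp
  | cons x t ih =>
    have h' := List.isChain_cons.mp h
    have iht := ih h'.2
    by_cases hx : x = "#"
    · subst hx
      have hcnt : (("#" :: t).count "#") = t.count "#" + 1 := by simp
      have ht : 2 * t.count "#" ≤ t.length := by
        cases t with
        | nil => simp
        | cons y u =>
          have hy : y ≠ "#" := by
            have := h'.1 y (by simp)
            intro hy; exact this ⟨rfl, hy⟩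
          exact iht.2 (by simpa using hy)
      refine ⟨?_, ?_⟩
      · rw [hcnt]; simp only [List.length_cons]; omega
      · intro hcontra; exact absurd rfl hcontra
    · have hcnt : ((x :: t).count "#") = t.count "#" := by simp [hx]
      have := iht.1
      refine ⟨?_, ?_⟩
      · rw [hcnt]; simp only [List.length_cons]; omega
      · intro _; rw [hcnt]; simp only [List.length_cons]; omega

lemma pvSlots_pos (s : List String) (h : List.IsChain pvNoHH s) (hh : s.headD "" ≠ "#") :
    1 ≤ pvSlots s := by
  have := (pvCnt s h).2 hh
  unfold pvSlots
  omega

lemma pvSlots_append_hash (s : List String) :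
    pvSlots (s ++ ["#"]) = pvSlots s - 1 := by
  unfold pvSlots
  simp [List.count_append]
  omega

lemma pvSlots_append_nonhash (s : List String) (c : String) (hc : c ≠ "#") :
    pvSlots (s ++ [c]) = pvSlots s + 1 := by
  unfold pvSlots
  have : ([c].count "#") = 0 := by simp [hc]
  simp [List.count_append, this]
  omega

lemma pvHeadD_append (l m : List String) (h : l ≠ []) :
    (l ++ m).headD "" = l.headD "" := by
  cases l with
  | nil => exact absurd rfl h
  | cons a t => simp

lemma pvGet0 (l : List String) (h : l ≠ []) :
    PySem.List.pyGet? l 0 = some (l.headD "") := by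
  cases l with
  | nil => exact absurd rfl h
  | cons a t => simp

lemma pvGetm2 (l : List String) (a b : String) :
    PySem.List.pyGet? (l ++ [a, b]) (-2) = some a := by
  rw [PySem.List.pyGet?_neg_ofNat _ 2 (by norm_num) (by simp)]
  have : (l ++ [a, b]).length - 2 = l.length := by simp
  rw [this]
  rw [List.getElem?_append_right (le_refl l.length)]
  simp

-- the inner while loop of A: appending "#" to a good stack collapses to a good
-- stack with one fewer available slot
lemma pvInner : ∀ n (s : List String), s.length ≤ n →
    List.IsChain pvNoHH s → (s = [] ∨ s.headD "" ≠ "#") →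
    ∃ r, pvInnerA (s ++ ["#"]) = some r ∧ List.IsChain pvNoHH r ∧ r ≠ [] ∧
      pvSlots r = pvSlots s - 1 ∧ (r.headD "" = "#" → r = ["#"]) := by
  intro n
  induction n with
  | zero =>
    intro s hlen _ _
    have : s = [] := List.eq_nil_of_length_eq_zero (Nat.le_zero.mp hlen)
    subst this
    exact ⟨["#"], by rw [pvInnerA.eq_def]; norm_num, by simp, by simp, by simp [pvSlots], fun _ => rfl⟩
  | succ n ihn =>
    intro s hlen hc hh
    rcases s.eq_nil_or_concat with rfl | ⟨u, x, rfl⟩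
    · exact ⟨["#"], by rw [pvInnerA.eq_def]; norm_num, by simp, by simp, by simp [pvSlots], fun _ => rfl⟩
    · simp only [List.concat_eq_append] at hh hc hlen ⊢
      have hs_ne : u ++ [x] ≠ [] := by simp
      have hh2 : (u ++ [x]).headD "" ≠ "#" := by
        rcases hh with h | h
        · exact absurd h hs_ne
        · exact h
      have hm1 : PySem.List.pyGet? ((u ++ [x]) ++ ["#"]) (-1) = some "#" :=
        PySem.List.pyGet?_neg_one_append_singleton _ _
      have hm2 : PySem.List.pyGet? ((u ++ [x]) ++ ["#"]) (-2) = some x := by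
        have : (u ++ [x]) ++ ["#"] = u ++ [x, "#"] := by simp
        rw [this]; exact pvGetm2 u x "#"
      by_cases hx : x = "#"
      · -- top of the stack was already "#": A pops three and pushes "#", recursing
        subst hx
        have hu_ne : u ≠ [] := by
          intro h; subst h; exact hh2 rfl
        obtain ⟨v, z, rfl⟩ := u.eq_nil_or_concat.resolve_left hu_ne
        simp only [List.concat_eq_append] at hh2 hc hlen hm1 hm2 ⊢
        have hc1 : List.IsChain pvNoHH (v ++ [z]) := (List.isChain_append.mp hc).1
        have hz : z ≠ "#" := by
          have := (List.isChain_append.mp hc).2.2 z (by simp) "#" (by simp)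
          intro hz; exact this ⟨hz, rfl⟩
        have hcv : List.IsChain pvNoHH v := (List.isChain_append.mp hc1).1
        have hhv : v = [] ∨ v.headD "" ≠ "#" := by
          cases v with
          | nil => exact Or.inl rfl
          | cons y t =>
            refine Or.inr ?_
            have e : ((y :: t) ++ [z] ++ ["#"]).headD "" = (y :: t).headD "" := by
              rw [pvHeadD_append _ _ (by simp), pvHeadD_append _ _ (by simp)]
            rw [← e]
            exact hh2
        obtain ⟨r, hr, hcr, hrne, hsl, hhead⟩ :=
          ihn v (by simp at hlen ⊢; omega) hcv hhv
        have hget0 : PySem.List.pyGet? ((v ++ [z] ++ ["#"]) ++ ["#"]) 0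
            = some ((v ++ [z]).headD "") := by
          rw [pvGet0 _ (by simp), pvHeadD_append _ _ (by simp), pvHeadD_append _ _ (by simp)]
        have hhz : (v ++ [z]).headD "" ≠ "#" := by
          rw [← pvHeadD_append (v ++ [z]) ["#"] (by simp)]
          exact hh2
        have hcond : ((PySem.List.pyGet? ((v ++ [z] ++ ["#"]) ++ ["#"]) 0 != some "#")
            && (PySem.List.pyGet? ((v ++ [z] ++ ["#"]) ++ ["#"]) (-1)
                == PySem.List.pyGet? ((v ++ [z] ++ ["#"]) ++ ["#"]) (-2))
            && (PySem.List.pyGet? ((v ++ [z] ++ ["#"]) ++ ["#"]) (-1) == some "#")) = true := by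
          rw [hget0, hm1, hm2]
          have hhz2 : ¬ v.head?.getD z = "#" := by simpa using hhz
          simp [hhz2]
        have hp1 : PySem.List.pop? ((v ++ [z] ++ ["#"]) ++ ["#"]) = some ("#", v ++ [z] ++ ["#"]) :=
          PySem.List.pop?_last _ _
        have hp2 : PySem.List.pop? (v ++ [z] ++ ["#"]) = some ("#", v ++ [z]) :=
          PySem.List.pop?_last _ _
        have hp3 : PySem.List.pop? (v ++ [z]) = some (z, v) :=
          PySem.List.pop?_last _ _
        refine ⟨r, ?_, hcr, hrne, ?_, hhead⟩
        · rw [pvInnerA.eq_def]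
          rw [if_pos hcond, hp1]
          split
          · next heq => cases heq
          · next a1 s1 heq =>
            obtain ⟨h1, h2⟩ := (Prod.mk.injEq _ _ _ _).mp (Option.some.inj heq)
            subst h1; subst h2
            rw [hp2]
            split
            · next heq2 => cases heq2
            · next a2 s2 heq2 =>
              obtain ⟨h1, h2⟩ := (Prod.mk.injEq _ _ _ _).mp (Option.some.inj heq2)
              subst h1; subst h2
              rw [hp3]
              split
              · next heq3 => cases heq3
              · next a3 s3 heq3 =>
                obtain ⟨h1, h2⟩ := (Prod.mk.injEq _ _ _ _).mp (Option.some.inj heq3)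
                subst h1; subst h2
                exact hr
        · rw [hsl, pvSlots_append_hash, pvSlots_append_nonhash _ _ hz]
          omega
      · -- top of the stack is a node: no collapse, the appended "#" stays
        refine ⟨(u ++ [x]) ++ ["#"], ?_, ?_, by simp, pvSlots_append_hash _, ?_⟩
        · rw [pvInnerA.eq_def]
          have hbeq : ((some "#" : Option String) == some x) = false := by
            simp
            exact fun h => hx h.symm
          have hcondn : ¬ ((PySem.List.pyGet? ((u ++ [x]) ++ ["#"]) 0 != some "#")
              && (PySem.List.pyGet? ((u ++ [x]) ++ ["#"]) (-1)
                  == PySem.List.pyGet? ((u ++ [x]) ++ ["#"]) (-2))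
              && (PySem.List.pyGet? ((u ++ [x]) ++ ["#"]) (-1) == some "#")) = true := by
            rw [hm1, hm2, hbeq]
            simp
          rw [if_neg hcondn]
        · rw [List.isChain_append]
          refine ⟨hc, by simp, ?_⟩
          intro a ha b hb
          simp at ha hb
          subst hb
          subst ha
          exact fun hab => hx hab.1
        · intro habs
          have e2 : ((u ++ [x]) ++ ["#"]).headD "" = (u ++ [x]).headD "" :=
            pvHeadD_append _ _ (by simp)
          rw [e2] at habs
          exact absurd habs hh2

-- the outer while loop of A agrees with B's counter loop on good stacks
lemma pvMain : ∀ (rem s : List String), List.IsChain pvNoHH s → s ≠ [] →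
    (s = ["#"] ∨ s.headD "" ≠ "#") →
    (match pvOuterA rem s with
     | none => false
     | some (r, st) => r.isEmpty && (PySem.List.pyGet? st 0 == some "#"))
    = pvLoopB rem (pvSlots s) := by
  intro rem
  induction rem with
  | nil =>
    intro s hc hne hh
    rcases hh with rfl | hh
    · decide
    · obtain ⟨x, t, rfl⟩ : ∃ x t, s = x :: t := by
        cases s with
        | nil => exact absurd rfl hne
        | cons x t => exact ⟨x, t, rfl⟩
      have hx : x ≠ "#" := by simpa using hh
      have hpos := pvSlots_pos _ hc hh
      have hz : pvSlots (x :: t) ≠ 0 := by omega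
      show (List.isEmpty [] && (PySem.List.pyGet? (x :: t) 0 == some "#")) = pvLoopB [] (pvSlots (x :: t))
      simp [pvLoopB, hx, hz]
  | cons c rest ih =>
    intro s hc hne hh
    rcases hh with rfl | hh
    · have hout : pvOuterA (c :: rest) ["#"] = some (c :: rest, ["#"]) := by
        simp [pvOuterA]
      rw [hout]
      show (List.isEmpty (c :: rest) && _) = pvLoopB (c :: rest) (pvSlots ["#"])
      have : pvSlots ["#"] = 0 := by decide
      rw [this]
      simp [pvLoopB]
    · obtain ⟨x, t, rfl⟩ : ∃ x t, s = x :: t := by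
        cases s with
        | nil => exact absurd rfl hne
        | cons x t => exact ⟨x, t, rfl⟩
      have hx : x ≠ "#" := by simpa using hh
      have hpos := pvSlots_pos _ hc hh
      have hguard : ((!(x :: t).isEmpty) && (PySem.List.pyGet? (x :: t) 0 != some "#")) = true := by
        simp [hx]
      by_cases hcc : c = "#"
      · subst hcc
        obtain ⟨r, hr, hcr, hrne, hsl, hhead⟩ :=
          pvInner (x :: t).length (x :: t) le_rfl hc (Or.inr hh)
        have hstep : pvOuterA ("#" :: rest) (x :: t) = pvOuterA rest r := by
          rw [pvOuterA]
          rw [if_pos hguard]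
          have hr' : pvInnerA (x :: (t ++ ["#"])) = some r := by
            rw [← List.cons_append]; exact hr
          simp [hr']
        rw [hstep]
        have hrdis : r = ["#"] ∨ r.headD "" ≠ "#" := by
          by_cases h : r.headD "" = "#"
          · exact Or.inl (hhead h)
          · exact Or.inr h
        rw [ih r hcr hrne hrdis, hsl]
        have hnneg : ¬ (pvSlots (x :: t) - 1 < 0) := by omega
        simp [pvLoopB, hnneg]
      · have hchain : List.IsChain pvNoHH ((x :: t) ++ [c]) := by
          rw [List.isChain_append]
          refine ⟨hc, by simp, ?_⟩
          intro a _ b hb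
          simp at hb
          subst hb
          exact fun hab => hcc hab.2
        have hstep : pvOuterA (c :: rest) (x :: t) = pvOuterA rest ((x :: t) ++ [c]) := by
          rw [pvOuterA]
          rw [if_pos hguard]
          have : (c == "#") = false := by simpa using hcc
          simp [this]
        rw [hstep]
        have hhd : ((x :: t) ++ [c]).headD "" ≠ "#" := by simpa using hx
        rw [ih ((x :: t) ++ [c]) hchain (by simp) (Or.inr hhd),
          pvSlots_append_nonhash _ _ hcc]
        have hnneg : ¬ (pvSlots (x :: t) - 1 < 0) := by omega
        have hb : (c != "#") = true := by simpa using hcc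
        have harith : pvSlots (x :: t) + 1 = pvSlots (x :: t) - 1 + 2 := by omega
        simp [pvLoopB, hnneg, hb, harith]

-- ===== VERDICT (by name: the statement is the Claim_ definition above) =====
theorem isValidSerialization_spec : Claim_equal_isValidSerialization := by
  intro preorder _
  unfold Spec_isValidSerialization isValidSerialization isValidSerialization_alt
  cases htoks : (PySem.Str.split? preorder ",").getD [""] with
  | nil => rfl
  | cons t0 rest =>
    have h := pvMain rest [t0] (by simp) (by simp)
      (by by_cases h0 : t0 = "#" <;> simp [h0])
    show (match pvOuterA rest [t0] with
      | none => false
      | some (remLeft, stack) => remLeft.isEmpty && (PySem.List.pyGet? stack 0 == some "#"))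
      = pvLoopB (t0 :: rest) 1
    rw [h]
    show pvLoopB rest (pvSlots [t0]) = pvLoopB (t0 :: rest) 1
    by_cases h0 : t0 = "#"
    · subst h0
      show pvLoopB rest (pvSlots ["#"]) = pvLoopB rest _
      norm_num [pvSlots, pvLoopB]
    · have : pvSlots [t0] = 2 := by
        unfold pvSlots
        have : ([t0].count "#") = 0 := by simp [h0]
        simp [this]
      rw [this]
      show pvLoopB rest 2 = pvLoopB (t0 :: rest) 1
      have hb : (t0 != "#") = true := by simpa using h0
      simp [pvLoopB, hb]
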